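-- pv_equiv track=rewrite | github.com/alanTBST/tablesalt | tablesalt/scripts/salesoutput.py | _method_resolution_any
-- ===== SOURCE A (Python) =====
-- from operator import itemgetter
--
-- def _method_resolution_any(res, length):
--     """
--     create the merging method resolution for results that
--     don't use locations
--     """
--
--     mro = []
--     paid = []
--
--     for k, v in res.items():
--         if length == 'short':
--             start_any = (k, 'short_ring')
--             mro.append(start_any)
--         if length == 'long':
--             start_any = (k, 'long')
--             mro.append(start_any)
--             start_any_ring = (k, 'long_ring')
--             mro.append(start_any_ring)
--
--         start_any_paid = (k, 'paid_zones')
--         paid.append(start_any_paid)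
--
--     if length == 'long':
--         mro = sorted(mro, key=itemgetter(1, 0))
--     mro = mro + paid
--
--     return mro
-- ===== SOURCE B (Python) =====
-- def _method_resolution_any(res, length):
--     """
--     create the merging method resolution for results that
--     don't use locations
--     """
--     keys = list(res)
--     if length == 'long':
--         mro = [(k, 'long') for k in sorted(keys)] + [(k, 'long_ring') for k in sorted(keys)]
--     elif length == 'short':
--         mro = [(k, 'short_ring') for k in keys]
--     else:
--         mro = []
--     return mro + [(k, 'paid_zones') for k in keys]
-- ===== Notes on version B (the rewrite author's own statement) =====
-- stated objective: simpler
-- what changed: B hoists the length test out of the per-key loop and, for 'long', builds two key-sorted groups ('long' then 'long_ring') directly instead of interleaving mixed (key, label) pairs and sorting them once by (label, key).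
import Mathlib
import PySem

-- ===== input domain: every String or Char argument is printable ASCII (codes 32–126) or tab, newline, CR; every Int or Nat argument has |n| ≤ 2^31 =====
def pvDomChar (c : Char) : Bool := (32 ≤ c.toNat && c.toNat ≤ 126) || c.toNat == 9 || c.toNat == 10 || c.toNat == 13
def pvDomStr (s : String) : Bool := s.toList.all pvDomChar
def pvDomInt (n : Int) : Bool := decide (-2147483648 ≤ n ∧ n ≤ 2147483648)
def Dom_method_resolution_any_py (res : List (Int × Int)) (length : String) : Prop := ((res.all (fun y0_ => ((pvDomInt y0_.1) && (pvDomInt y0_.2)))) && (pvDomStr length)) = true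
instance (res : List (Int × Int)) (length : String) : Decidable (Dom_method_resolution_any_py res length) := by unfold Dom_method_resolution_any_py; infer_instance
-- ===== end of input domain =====

-- B hoists the length test out of the loop and builds the 'long' result as two
-- key-sorted groups instead of sorting the mixed (key, label) list once (objective: simpler).

-- ===== PORT A =====
def method_resolution_any_py (res : List (Int × Int)) (length : String) : List (Int × String) :=
  let st := res.foldl (fun (st : List (Int × String) × List (Int × String)) kv =>
      let mro := st.1
      let paid := st.2
      let mro := if length = "short" then mro ++ [(kv.1, "short_ring")] else mro
      let mro := if length = "long" then (mro ++ [(kv.1, "long")]) ++ [(kv.1, "long_ring")] else mro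
      (mro, paid ++ [(kv.1, "paid_zones")])) ([], [])
  let mro := if length = "long" then PySem.List.sorted2 st.1 (fun p => p.2) (fun p => p.1) else st.1
  mro ++ st.2

-- ===== PORT B =====
def method_resolution_any_py_alt (res : List (Int × Int)) (length : String) : List (Int × String) :=
  let keys := res.map Prod.fst
  let mro :=
    if length = "long" then
      (PySem.List.sorted keys (fun k => k)).map (fun k => (k, "long"))
        ++ (PySem.List.sorted keys (fun k => k)).map (fun k => (k, "long_ring"))
    else if length = "short" then
      keys.map (fun k => (k, "short_ring"))
    else []
  mro ++ keys.map (fun k => (k, "paid_zones"))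

-- ===== PRECONDITION & SPEC =====
-- res ports a Python dict, whose keys are unique; association lists with duplicate
-- keys represent no dict input, so they are excluded.
def Pre_method_resolution_any_py (res : List (Int × Int)) (length : String) : Prop :=
  (res.map Prod.fst).Nodup
instance (res : List (Int × Int)) (length : String) : Decidable (Pre_method_resolution_any_py res length) := by unfold Pre_method_resolution_any_py; infer_instance
def pvWitness_method_resolution_any_py : (List (Int × Int)) × String := ([(3, 2), (1, 4)], "long")
def Spec_method_resolution_any_py (res : List (Int × Int)) (length : String) (out : List (Int × String)) : Prop := out = method_resolution_any_py_alt res length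
instance (res : List (Int × Int)) (length : String) (out : List (Int × String)) : Decidable (Spec_method_resolution_any_py res length out) := by unfold Spec_method_resolution_any_py; infer_instance

-- ===== CLAIM (what is proved, stated in full; the proofs are below) =====
def Claim_equal_method_resolution_any_py : Prop := ∀ (res : List (Int × Int)) (length : String), Dom_method_resolution_any_py res length → Pre_method_resolution_any_py res length → Spec_method_resolution_any_py res length (method_resolution_any_py res length)

-- ===== LEMMAS AND PROOFS =====

-- A's loop, once the length tests are resolved, appends g kv.1 to mro and the paid pair to paid.
theorem pv_fold (g : Int → List (Int × String)) (res : List (Int × Int))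
    (m p : List (Int × String)) :
    res.foldl (fun (st : List (Int × String) × List (Int × String)) kv =>
        (st.1 ++ g kv.1, st.2 ++ [(kv.1, "paid_zones")])) (m, p)
      = (m ++ res.flatMap (fun kv => g kv.1),
         p ++ res.map (fun kv => (kv.1, "paid_zones"))) := by
  induction res generalizing m p with
  | nil => simp
  | cons x t ih => simp [ih]

-- Python's sorted(..., key=itemgetter(1, 0)) is sorting by the lexicographic pair key.
theorem pv_sorted2_lex {α : Type} (xs : List α) (k1 : α → String) (k2 : α → Int) :
    PySem.List.sorted2 xs k1 k2 = PySem.List.sorted xs (fun a => toLex (k1 a, k2 a)) := by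
  rw [PySem.List.sorted_eq_foldl_insertBy]
  show List.foldl (fun acc x => PySem.List.insertBy _ x acc) [] xs = _
  have hfun : (fun (a b : α) => decide (k1 a < k1 b) || (!decide (k1 b < k1 a) && decide (k2 a < k2 b)))
      = fun a b => decide (toLex (k1 a, k2 a) < toLex (k1 b, k2 b)) := by
    funext a b
    rw [← decide_not, ← Bool.decide_and, ← Bool.decide_or]
    refine decide_eq_decide.mpr ?_
    rw [Prod.Lex.toLex_lt_toLex]
    dsimp only
    constructor
    · rintro (h1 | ⟨h2, h3⟩)
      · exact Or.inl h1
      · rcases lt_or_ge (k1 a) (k1 b) with h | h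
        · exact Or.inl h
        · exact Or.inr ⟨le_antisymm (not_lt.mp h2) h, h3⟩
    · rintro (h1 | ⟨h2, h3⟩)
      · exact Or.inl h1
      · exact Or.inr ⟨by rw [h2]; exact lt_irrefl _, h3⟩
  rw [hfun]
  simp

-- Interleaved [(k,'long'),(k,'long_ring')] pairs are a rearrangement of the two grouped maps.
theorem pv_interleave_perm (f g : Int → Int × String) (ks : List Int) :
    (List.map f ks ++ List.map g ks).Perm (ks.flatMap fun k => [f k, g k]) := by
  induction ks with
  | nil => simp
  | cons k t ih =>
    simp only [List.map_cons, List.flatMap_cons, List.cons_append]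
    exact List.Perm.cons _ (List.perm_middle.trans (List.Perm.cons _ ih))

theorem pv_sorted_nodup_strict (ks : List Int) (h : ks.Nodup) :
    (PySem.List.sorted ks (fun k => k)).Pairwise (· < ·) := by
  have hnd : (PySem.List.sorted ks (fun k => k)).Nodup :=
    (PySem.List.sorted_perm ks (fun k => k) false).nodup_iff.mpr h
  have hle := PySem.List.sorted_pairwise ks (fun k => k)
  exact (hle.and hnd).imp (fun {a b} hab => lt_of_le_of_ne hab.1 hab.2)

theorem pv_flatMap_singleton (s : String) (res : List (Int × Int)) :
    res.flatMap (fun kv => [(kv.1, s)]) = res.map (fun kv => (kv.1, s)) := by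
  induction res with
  | nil => rfl
  | cons x t ih => simp [ih]

theorem pv_flatMap_nil (res : List (Int × Int)) :
    res.flatMap (fun _ => ([] : List (Int × String))) = [] := by
  induction res with
  | nil => rfl
  | cons x t ih => simp [ih]

theorem method_resolution_any_py_spec_aux (res : List (Int × Int)) (length : String)
    (hpre : (res.map Prod.fst).Nodup) :
    method_resolution_any_py res length = method_resolution_any_py_alt res length := by
  unfold method_resolution_any_py method_resolution_any_py_alt
  by_cases hl : length = "long"
  · subst hl
    have hfold := List.foldl_ext
      (fun (st : List (Int × String) × List (Int × String)) kv =>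
          let mro := st.1
          let paid := st.2
          let mro := if ("long" : String) = "short" then mro ++ [(kv.1, "short_ring")] else mro
          let mro := if ("long" : String) = "long" then (mro ++ [(kv.1, "long")]) ++ [(kv.1, "long_ring")] else mro
          (mro, paid ++ [(kv.1, "paid_zones")]))
      (fun st kv => (st.1 ++ [(kv.1, "long"), (kv.1, "long_ring")], st.2 ++ [(kv.1, "paid_zones")]))
      (([], []) : List (Int × String) × List (Int × String)) (l := res)
      (by intro a b _; simp)
    rw [hfold, pv_fold (fun k => [(k, "long"), (k, "long_ring")]) res [] []]
    simp only [reduceIte, List.nil_append]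
    refine congrArg₂ (· ++ ·) ?_ (by simp [List.map_map, Function.comp])
    rw [pv_sorted2_lex]
    apply PySem.List.sorted_eq_of_perm_of_pairwise_lt
    · -- permutation
      have h1 : (res.flatMap fun kv => [(kv.1, "long"), (kv.1, "long_ring")])
          = (res.map Prod.fst).flatMap (fun k => [((k : Int), ("long" : String)), (k, "long_ring")]) := by
        simp [List.flatMap_map]
      rw [h1]
      exact (List.Perm.append
          ((PySem.List.sorted_perm (res.map Prod.fst) (fun k => k) false).map
            (fun k => ((k : Int), ("long" : String))))
          ((PySem.List.sorted_perm (res.map Prod.fst) (fun k => k) false).map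
            (fun k => ((k : Int), ("long_ring" : String))))).trans
        (pv_interleave_perm (fun k => ((k : Int), ("long" : String)))
          (fun k => ((k : Int), ("long_ring" : String))) (res.map Prod.fst))
    · -- strictly increasing under the lex key
      have hstrict := pv_sorted_nodup_strict (res.map Prod.fst) hpre
      rw [List.pairwise_append]
      refine ⟨?_, ?_, ?_⟩
      · rw [List.pairwise_map]
        exact hstrict.imp (fun {a b} hab => by
          simp [Prod.Lex.toLex_lt_toLex, hab])
      · rw [List.pairwise_map]
        exact hstrict.imp (fun {a b} hab => by
          simp [Prod.Lex.toLex_lt_toLex, hab])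
      · intro a ha b hb
        simp only [List.mem_map] at ha hb
        obtain ⟨ka, _, rfl⟩ := ha
        obtain ⟨kb, _, rfl⟩ := hb
        simp [Prod.Lex.toLex_lt_toLex]
  · by_cases hs : length = "short"
    · subst hs
      have hfold := List.foldl_ext
        (fun (st : List (Int × String) × List (Int × String)) kv =>
            let mro := st.1
            let paid := st.2
            let mro := if ("short" : String) = "short" then mro ++ [(kv.1, "short_ring")] else mro
            let mro := if ("short" : String) = "long" then (mro ++ [(kv.1, "long")]) ++ [(kv.1, "long_ring")] else mro
            (mro, paid ++ [(kv.1, "paid_zones")]))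
        (fun st kv => (st.1 ++ [(kv.1, "short_ring")], st.2 ++ [(kv.1, "paid_zones")]))
        (([], []) : List (Int × String) × List (Int × String)) (l := res)
        (by intro a b _; simp)
      rw [hfold, pv_fold (fun k => [(k, "short_ring")]) res [] []]
      simp only [reduceIte]
      simp [pv_flatMap_singleton, List.map_map, Function.comp_def]
    · have hfold := List.foldl_ext
        (fun (st : List (Int × String) × List (Int × String)) kv =>
            let mro := st.1
            let paid := st.2
            let mro := if length = "short" then mro ++ [(kv.1, "short_ring")] else mro
            let mro := if length = "long" then (mro ++ [(kv.1, "long")]) ++ [(kv.1, "long_ring")] else mro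
            (mro, paid ++ [(kv.1, "paid_zones")]))
        (fun st kv => (st.1 ++ ([] : List (Int × String)), st.2 ++ [(kv.1, "paid_zones")]))
        (([], []) : List (Int × String) × List (Int × String)) (l := res)
        (by intro a b _; simp [hl, hs])
      rw [hfold, pv_fold (fun _ => []) res [] []]
      simp only [if_neg hl, if_neg hs]
      simp [pv_flatMap_nil, List.map_map, Function.comp_def]

-- ===== VERDICT (by name: the statement is the Claim_ definition above) =====
theorem method_resolution_any_py_spec : Claim_equal_method_resolution_any_py := by
  intro res length _ hpre
  exact method_resolution_any_py_spec_aux res length hpre
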